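-- pv_equiv track=rewrite | github.com/vnery5/EstimaMIPNacional_v3_Guilhoto | SupportFunctions_V3.py | name_disaggregation
-- ===== SOURCE A (Python) =====
-- def name_disaggregation(vNames, nNumDisaggreg, vPosDisaggreg, vNamesDisaggreg, nIndex):
--     """
--     Disaggregates the name's vector for products and sectors
--     :param vNames: vector (1D array) containing the names of sectors/products (WITHOUT the disaggregations)
--     :param nNumDisaggreg: number of sectors/products that were disaggregated;
--     :param vPosDisaggreg: vector containing the indexes of the products to be disaggregated;
--     :param vNamesDisaggreg: vector containing the names of the products to be disaggregated;
--     :param nIndex: total number of sectors/products (WITHOUT the disaggregations);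
--     :return:
--         vNewName: nNewSectors x 1 array containing all names of products/sectors (WITH the disaggregations)
--     """
--
--     ## Creating empty list to store the names
--     vNewName = []
--     nRow = 0
--     nDisaggreg = 0
--
--     ## Starting from the initial sector/product to be disaggregated up until all disaggregations,
--     while nDisaggreg < nNumDisaggreg:
--         ## Up until the initial product/sector to be disaggregated, just copy the values
--         if nRow != vPosDisaggreg[nDisaggreg]:
--             vNewName.append(vNames[nRow])
--             nRow += 1
--         ## If the products/sectors were created based on a disaggregation
--         elif nRow == vPosDisaggreg[nDisaggreg]:
--             ## Append its name to the list and add one to nDisaggreg in order to continue the loop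
--             vNewName.append(vNamesDisaggreg[nDisaggreg])
--             nDisaggreg += 1
--
--             ## Updating nRow for the loop (in cases where disaggregated products/sectors are not together)
--             if nDisaggreg < nNumDisaggreg:
--                 nRow = vPosDisaggreg[nDisaggreg]
--
--     ## For all product/sectors after the last disaggregation, just copy the values
--     nRow += 1
--     while nRow < nIndex:
--         vNewName.append(vNames[nRow])
--         nRow += 1
--
--     return vNewName
-- ===== SOURCE B (Python) =====
-- def name_disaggregation(vNames, nNumDisaggreg, vPosDisaggreg, vNamesDisaggreg, nIndex):
--     """Three straight copy passes: head of vNames, the disaggregated names, tail of vNames."""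
--     vNewName = []
--     if nNumDisaggreg > 0:
--         for i in range(vPosDisaggreg[0]):
--             vNewName.append(vNames[i])
--         for d in range(nNumDisaggreg):
--             vNewName.append(vNamesDisaggreg[d])
--         for i in range(vPosDisaggreg[nNumDisaggreg - 1] + 1, nIndex):
--             vNewName.append(vNames[i])
--     else:
--         for i in range(nIndex):
--             vNewName.append(vNames[i])
--     return vNewName
-- ===== Notes on version B (the rewrite author's own statement) =====
-- stated objective: simpler
-- what changed: Replaces A's single while-loop state machine (cursor nRow jumping via reassignment, interleaved branch on nRow == vPosDisaggreg[nDisaggreg]) by three independent copy passes: vNames up to the first disaggregation index, then all disaggregated names, then vNames after the last disaggregation index; Pre_ excludes inputs where an index access raises, including the corner nNumDisaggreg<=0, nIndex=1, vNames=[] where A returns [] but B's natural vNames[0] access raises.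
-- intended difference: When nNumDisaggreg <= 0 and nIndex >= 1, A's unconditional nRow += 1 after the (empty) main loop silently drops vNames[0] and returns vNames[1:nIndex]; B returns vNames[0:nIndex], the full name list, which is the intended value when nothing is disaggregated. — e.g. on name_disaggregation(["agri", "manu"], 0, [], [], 2): A returns ["manu"], B returns ["agri", "manu"]
-- outside the precondition, e.g. on name_disaggregation([], 0, [], [], 1): A returns [], B raises IndexError
import Mathlib
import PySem

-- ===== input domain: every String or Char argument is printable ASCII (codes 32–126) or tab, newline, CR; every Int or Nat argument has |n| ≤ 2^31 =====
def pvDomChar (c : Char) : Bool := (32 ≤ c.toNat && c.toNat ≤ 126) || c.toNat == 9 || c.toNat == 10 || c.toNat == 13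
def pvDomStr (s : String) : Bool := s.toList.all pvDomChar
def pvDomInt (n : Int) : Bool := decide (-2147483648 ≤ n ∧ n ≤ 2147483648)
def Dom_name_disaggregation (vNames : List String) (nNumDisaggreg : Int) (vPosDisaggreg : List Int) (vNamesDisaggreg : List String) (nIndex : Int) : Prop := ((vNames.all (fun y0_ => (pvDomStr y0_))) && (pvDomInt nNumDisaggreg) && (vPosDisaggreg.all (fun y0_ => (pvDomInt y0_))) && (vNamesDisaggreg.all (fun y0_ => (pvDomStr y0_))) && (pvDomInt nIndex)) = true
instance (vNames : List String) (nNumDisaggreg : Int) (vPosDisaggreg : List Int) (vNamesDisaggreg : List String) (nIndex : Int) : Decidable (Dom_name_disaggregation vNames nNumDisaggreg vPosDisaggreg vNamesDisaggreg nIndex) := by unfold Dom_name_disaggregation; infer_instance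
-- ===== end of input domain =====

-- B replaces A's one-loop cursor-jump state machine by three straight copy passes (simpler
-- decomposition, same O(n) cost); with zero disaggregations B keeps vNames[0], which A drops (D_).

-- ===== PORT A =====
-- First while loop of A: state (vNewName, nRow, nDisaggreg); a `none` from pyGet? is a Python
-- IndexError, at which the recursion stops (those inputs lie outside Pre_).
def pvLoop1 (vNames : List String) (vPos : List Int) (vND : List String) (nNum : Int)
    (acc : List String) (nRow nDis : Int) : List String × Int :=
  if _hlt : nDis < nNum then
    match PySem.List.pyGet? vPos nDis with
    | none => (acc, nRow)          -- IndexError on vPosDisaggreg[nDisaggreg]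
    | some p =>
      if nRow ≠ p then
        match hv : PySem.List.pyGet? vNames nRow with
        | none => (acc, nRow)      -- IndexError on vNames[nRow]
        | some v => pvLoop1 vNames vPos vND nNum (acc ++ [v]) (nRow + 1) nDis
      else
        match PySem.List.pyGet? vND nDis with
        | none => (acc, nRow)      -- IndexError on vNamesDisaggreg[nDisaggreg]
        | some nm =>
          if nDis + 1 < nNum then
            match PySem.List.pyGet? vPos (nDis + 1) with
            | none => (acc ++ [nm], nRow)   -- IndexError on vPosDisaggreg[nDisaggreg] (after increment)
            | some p' => pvLoop1 vNames vPos vND nNum (acc ++ [nm]) p' (nDis + 1)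
          else (acc ++ [nm], nRow)
  else (acc, nRow)
termination_by ((nNum - nDis).toNat, (vNames.length - nRow).toNat)
decreasing_by
  · apply Prod.Lex.right
    have hin : PySem.Raise.InRange vNames.length nRow := by
      by_contra hc
      rw [← PySem.List.pyGet?_eq_none_iff (xs := vNames)] at hc
      simp [hc] at hv
    have : nRow < (vNames.length : Int) := hin.2
    omega
  · apply Prod.Lex.left; omega

-- Second while loop of A: copy vNames[nRow] while nRow < nIndex.
def pvLoop2 (vNames : List String) (nIndex : Int) (acc : List String) (nRow : Int) : List String :=
  if _h : nRow < nIndex then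
    match PySem.List.pyGet? vNames nRow with
    | none => acc                  -- IndexError on vNames[nRow]
    | some v => pvLoop2 vNames nIndex (acc ++ [v]) (nRow + 1)
  else acc
termination_by (nIndex - nRow).toNat
decreasing_by omega

def name_disaggregation (vNames : List String) (nNumDisaggreg : Int) (vPosDisaggreg : List Int) (vNamesDisaggreg : List String) (nIndex : Int) : List String :=
  let st := pvLoop1 vNames vPosDisaggreg vNamesDisaggreg nNumDisaggreg [] 0 0
  pvLoop2 vNames nIndex st.1 (st.2 + 1)

-- ===== PORT B =====
-- for i in range(lo, hi): out.append(xs[i])  — stops at a `none` (Python IndexError, outside Pre_).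
def pvCopyIdx {α : Type} (xs : List α) (lo hi : Int) : List α :=
  if _h : lo < hi then
    match PySem.List.pyGet? xs lo with
    | none => []
    | some v => v :: pvCopyIdx xs (lo + 1) hi
  else []
termination_by (hi - lo).toNat
decreasing_by omega

def name_disaggregation_alt (vNames : List String) (nNumDisaggreg : Int) (vPosDisaggreg : List Int) (vNamesDisaggreg : List String) (nIndex : Int) : List String :=
  if 0 < nNumDisaggreg then
    match PySem.List.pyGet? vPosDisaggreg 0 with
    | none => []                   -- IndexError on vPosDisaggreg[0]
    | some p0 =>
      let pre := pvCopyIdx vNames 0 p0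
      let mid := pvCopyIdx vNamesDisaggreg 0 nNumDisaggreg
      match PySem.List.pyGet? vPosDisaggreg (nNumDisaggreg - 1) with
      | none => pre ++ mid         -- IndexError on vPosDisaggreg[nNumDisaggreg - 1]
      | some pl => pre ++ mid ++ pvCopyIdx vNames (pl + 1) nIndex
  else pvCopyIdx vNames 0 nIndex

-- ===== PRECONDITION & SPEC =====
-- Pre_ = the inputs on which Python A returns without an IndexError, minus one corner where A
-- returns but B raises: with nNumDisaggreg ≤ 0, nIndex = 1 and vNames = [], A returns [] while
-- B's natural vNames[0] access raises, so Pre_ requires nIndex ≤ 0 ∨ nIndex ≤ len(vNames) there.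
def Pre_name_disaggregation (vNames : List String) (nNumDisaggreg : Int) (vPosDisaggreg : List Int) (vNamesDisaggreg : List String) (nIndex : Int) : Prop :=
  nNumDisaggreg ≤ (vPosDisaggreg.length : Int) ∧ nNumDisaggreg ≤ (vNamesDisaggreg.length : Int) ∧
  (0 < nNumDisaggreg → 0 ≤ vPosDisaggreg.headI ∧ vPosDisaggreg.headI ≤ (vNames.length : Int) ∧
    (let s : Int := vPosDisaggreg.getD (nNumDisaggreg - 1).toNat 0 + 1;
     nIndex ≤ s ∨ (-(vNames.length : Int) ≤ s ∧ nIndex ≤ (vNames.length : Int)))) ∧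
  (nNumDisaggreg ≤ 0 → nIndex ≤ 0 ∨ nIndex ≤ (vNames.length : Int))
instance (vNames : List String) (nNumDisaggreg : Int) (vPosDisaggreg : List Int) (vNamesDisaggreg : List String) (nIndex : Int) : Decidable (Pre_name_disaggregation vNames nNumDisaggreg vPosDisaggreg vNamesDisaggreg nIndex) := by unfold Pre_name_disaggregation; infer_instance

def pvWitness_name_disaggregation : List String × Int × List Int × List String × Int :=
  (["agri", "manu", "serv"], 2, [1, 1], ["manu A", "manu B"], 3)

-- When nNumDisaggreg ≤ 0 and nIndex ≥ 1, A's unconditional `nRow += 1` after the (empty) main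
-- loop silently drops vNames[0] and returns vNames[1:nIndex]; B returns vNames[0:nIndex], the
-- full name list, which is the intended value when nothing is disaggregated.
def D_name_disaggregation (vNames : List String) (nNumDisaggreg : Int) (vPosDisaggreg : List Int) (vNamesDisaggreg : List String) (nIndex : Int) : Prop :=
  nNumDisaggreg ≤ 0 ∧ 1 ≤ nIndex
instance (vNames : List String) (nNumDisaggreg : Int) (vPosDisaggreg : List Int) (vNamesDisaggreg : List String) (nIndex : Int) : Decidable (D_name_disaggregation vNames nNumDisaggreg vPosDisaggreg vNamesDisaggreg nIndex) := by unfold D_name_disaggregation; infer_instance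

def Spec_name_disaggregation (vNames : List String) (nNumDisaggreg : Int) (vPosDisaggreg : List Int) (vNamesDisaggreg : List String) (nIndex : Int) (out : List String) : Prop := ¬ D_name_disaggregation vNames nNumDisaggreg vPosDisaggreg vNamesDisaggreg nIndex → out = name_disaggregation_alt vNames nNumDisaggreg vPosDisaggreg vNamesDisaggreg nIndex
instance (vNames : List String) (nNumDisaggreg : Int) (vPosDisaggreg : List Int) (vNamesDisaggreg : List String) (nIndex : Int) (out : List String) : Decidable (Spec_name_disaggregation vNames nNumDisaggreg vPosDisaggreg vNamesDisaggreg nIndex out) := by unfold Spec_name_disaggregation; infer_instance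

def pvDiffWitness_name_disaggregation : List String × Int × List Int × List String × Int :=
  (["agri", "manu"], 0, [], [], 2)
def pvDiffWitnessOut_name_disaggregation : (List String) × (List String) :=
  (["manu"], ["agri", "manu"])

-- ===== CLAIM (what is proved, stated in full; the proofs are below) =====
def Claim_unchanged_name_disaggregation : Prop := ∀ (vNames : List String) (nNumDisaggreg : Int) (vPosDisaggreg : List Int) (vNamesDisaggreg : List String) (nIndex : Int), Dom_name_disaggregation vNames nNumDisaggreg vPosDisaggreg vNamesDisaggreg nIndex → Pre_name_disaggregation vNames nNumDisaggreg vPosDisaggreg vNamesDisaggreg nIndex → Spec_name_disaggregation vNames nNumDisaggreg vPosDisaggreg vNamesDisaggreg nIndex (name_disaggregation vNames nNumDisaggreg vPosDisaggreg vNamesDisaggreg nIndex)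
def Claim_changed_name_disaggregation : Prop := Dom_name_disaggregation (pvDiffWitness_name_disaggregation.1) (pvDiffWitness_name_disaggregation.2.1) (pvDiffWitness_name_disaggregation.2.2.1) (pvDiffWitness_name_disaggregation.2.2.2.1) (pvDiffWitness_name_disaggregation.2.2.2.2) ∧ Pre_name_disaggregation (pvDiffWitness_name_disaggregation.1) (pvDiffWitness_name_disaggregation.2.1) (pvDiffWitness_name_disaggregation.2.2.1) (pvDiffWitness_name_disaggregation.2.2.2.1) (pvDiffWitness_name_disaggregation.2.2.2.2) ∧ D_name_disaggregation (pvDiffWitness_name_disaggregation.1) (pvDiffWitness_name_disaggregation.2.1) (pvDiffWitness_name_disaggregation.2.2.1) (pvDiffWitness_name_disaggregation.2.2.2.1) (pvDiffWitness_name_disaggregation.2.2.2.2) ∧ name_disaggregation (pvDiffWitness_name_disaggregation.1) (pvDiffWitness_name_disaggregation.2.1) (pvDiffWitness_name_disaggregation.2.2.1) (pvDiffWitness_name_disaggregation.2.2.2.1) (pvDiffWitness_name_disaggregation.2.2.2.2) = pvDiffWitnessOut_name_disaggregation.1 ∧ name_disaggregation_alt (pvDiffWitness_name_disaggregation.1)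 (pvDiffWitness_name_disaggregation.2.1) (pvDiffWitness_name_disaggregation.2.2.1) (pvDiffWitness_name_disaggregation.2.2.2.1) (pvDiffWitness_name_disaggregation.2.2.2.2) = pvDiffWitnessOut_name_disaggregation.2 ∧ pvDiffWitnessOut_name_disaggregation.1 ≠ pvDiffWitnessOut_name_disaggregation.2
def Claim_exact_name_disaggregation : Prop := ∀ (vNames : List String) (nNumDisaggreg : Int) (vPosDisaggreg : List Int) (vNamesDisaggreg : List String) (nIndex : Int), Dom_name_disaggregation vNames nNumDisaggreg vPosDisaggreg vNamesDisaggreg nIndex → Pre_name_disaggregation vNames nNumDisaggreg vPosDisaggreg vNamesDisaggreg nIndex → D_name_disaggregation vNames nNumDisaggreg vPosDisaggreg vNamesDisaggreg nIndex → name_disaggregation vNames nNumDisaggreg vPosDisaggreg vNamesDisaggreg nIndex ≠ name_disaggregation_alt vNames nNumDisaggreg vPosDisaggreg vNamesDisaggreg nIndex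

-- ===== LEMMAS AND PROOFS =====

-- A's trailing copy loop is B's index-range copy.
theorem pvLoop2_eq_copy (vNames : List String) (nIndex : Int) :
    ∀ acc nRow, pvLoop2 vNames nIndex acc nRow = acc ++ pvCopyIdx vNames nRow nIndex := by
  suffices H : ∀ n acc nRow, (nIndex - nRow).toNat ≤ n →
      pvLoop2 vNames nIndex acc nRow = acc ++ pvCopyIdx vNames nRow nIndex by
    intro acc nRow; exact H (nIndex - nRow).toNat acc nRow le_rfl
  intro n
  induction n with
  | zero =>
    intro acc nRow hn
    have h : ¬ nRow < nIndex := by omega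
    rw [pvLoop2, pvCopyIdx, dif_neg h, dif_neg h, List.append_nil]
  | succ n ih =>
    intro acc nRow hn
    by_cases h : nRow < nIndex
    · rw [pvLoop2, pvCopyIdx, dif_pos h, dif_pos h]
      cases hv : PySem.List.pyGet? vNames nRow with
      | none => simp
      | some v =>
        simp only [ih (acc ++ [v]) (nRow + 1) (by omega)]
        simp
    · rw [pvLoop2, pvCopyIdx, dif_neg h, dif_neg h, List.append_nil]

-- Phase 1 of A's main loop: while nRow < p (= vPos[nDis]), copy vNames[nRow].
theorem pvLoop1_copy (vNames : List String) (vPos : List Int) (vND : List String) (nNum : Int)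
    (nDis p : Int) (hlt : nDis < nNum) (hp : PySem.List.pyGet? vPos nDis = some p)
    (hple : p ≤ (vNames.length : Int)) :
    ∀ acc nRow, 0 ≤ nRow → nRow ≤ p →
      pvLoop1 vNames vPos vND nNum acc nRow nDis
        = pvLoop1 vNames vPos vND nNum (acc ++ pvCopyIdx vNames nRow p) p nDis := by
  suffices H : ∀ n acc nRow, 0 ≤ nRow → nRow ≤ p → (p - nRow).toNat ≤ n →
      pvLoop1 vNames vPos vND nNum acc nRow nDis
        = pvLoop1 vNames vPos vND nNum (acc ++ pvCopyIdx vNames nRow p) p nDis by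
    intro acc nRow h0 h1; exact H (p - nRow).toNat acc nRow h0 h1 le_rfl
  intro n
  induction n with
  | zero =>
    intro acc nRow h0 h1 hn
    have he : nRow = p := by omega
    subst he
    rw [pvCopyIdx, dif_neg (lt_irrefl nRow), List.append_nil]
  | succ n ih =>
    intro acc nRow h0 h1 hn
    by_cases he : nRow = p
    · subst he; rw [pvCopyIdx, dif_neg (lt_irrefl nRow), List.append_nil]
    · have hlt' : nRow < p := lt_of_le_of_ne h1 he
      have hvr : PySem.List.pyGet? vNames nRow = some (vNames[nRow.toNat]'(by omega)) := by
        rw [PySem.List.pyGet?_of_nonneg vNames h0]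
        exact List.getElem?_eq_getElem (by omega)
      conv_lhs => rw [pvLoop1]
      rw [dif_pos hlt]
      simp only [hp]
      rw [if_pos (show nRow ≠ p from he)]
      rw [pvCopyIdx, dif_pos hlt', hvr]
      split
      · rename_i heq
        exact absurd heq (by simp)
      · rename_i v heq
        injection heq with h2
        subst h2
        rw [ih (acc ++ [vNames[nRow.toNat]'(by omega)]) (nRow + 1) (by omega) (by omega) (by omega)]
        simp

-- Phase 2: once nRow = vPos[nDis], A emits vND[nDis..nNum-1] back to back and leaves
-- nRow = vPos[nNum-1].
theorem pvLoop1_emit (vNames : List String) (vPos : List Int) (vND : List String) (nNum : Int)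
    (hpos : nNum ≤ (vPos.length : Int)) (hnd : nNum ≤ (vND.length : Int)) :
    ∀ nDis, 0 ≤ nDis → nDis < nNum →
      ∀ p q, PySem.List.pyGet? vPos nDis = some p → PySem.List.pyGet? vPos (nNum - 1) = some q →
      ∀ acc, pvLoop1 vNames vPos vND nNum acc p nDis = (acc ++ pvCopyIdx vND nDis nNum, q) := by
  suffices H : ∀ n nDis, 0 ≤ nDis → nDis < nNum → (nNum - nDis).toNat ≤ n →
      ∀ p q, PySem.List.pyGet? vPos nDis = some p → PySem.List.pyGet? vPos (nNum - 1) = some q →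
      ∀ acc, pvLoop1 vNames vPos vND nNum acc p nDis = (acc ++ pvCopyIdx vND nDis nNum, q) by
    intro nDis h0 h1 p q hp hq acc; exact H (nNum - nDis).toNat nDis h0 h1 le_rfl p q hp hq acc
  intro n
  induction n with
  | zero => intro nDis h0 h1 hn; omega
  | succ n ih =>
    intro nDis h0 h1 hn p q hp hq acc
    have hnm : PySem.List.pyGet? vND nDis = some (vND[nDis.toNat]'(by omega)) := by
      rw [PySem.List.pyGet?_of_nonneg vND h0]
      exact List.getElem?_eq_getElem (by omega)
    rw [pvLoop1, dif_pos h1]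
    simp only [hp]
    rw [if_neg (show ¬ p ≠ p from not_not_intro rfl)]
    simp only [hnm]
    rw [pvCopyIdx, dif_pos h1, hnm]
    by_cases hmore : nDis + 1 < nNum
    · have hp' : PySem.List.pyGet? vPos (nDis + 1) =
          some (vPos[(nDis + 1).toNat]'(by omega)) := by
        rw [PySem.List.pyGet?_of_nonneg vPos (by omega)]
        exact List.getElem?_eq_getElem (by omega)
      rw [if_pos hmore]
      simp only [hp']
      rw [ih (nDis + 1) (by omega) hmore (by omega) _ q hp' hq]
      simp
    · have he : nDis = nNum - 1 := by omega
      have hpq : p = q := by rw [he] at hp; rw [hp] at hq; exact Option.some.inj hq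
      simp only [if_neg hmore, hpq]
      rw [pvCopyIdx, dif_neg (show ¬ nDis + 1 < nNum from hmore)]

-- On the positive branch A and B agree (used by both the unchanged and no-D cases).
theorem pv_eq_pos (vNames : List String) (nNum : Int) (vPos : List Int)
    (vND : List String) (nIndex : Int)
    (hn : 0 < nNum) (hpos : nNum ≤ (vPos.length : Int)) (hnd : nNum ≤ (vND.length : Int))
    (hh0 : 0 ≤ vPos.headI) (hhle : vPos.headI ≤ (vNames.length : Int)) :
    name_disaggregation vNames nNum vPos vND nIndex
      = name_disaggregation_alt vNames nNum vPos vND nIndex := by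
  unfold name_disaggregation name_disaggregation_alt
  have hlen0 : 0 < vPos.length := by omega
  have hp0 : PySem.List.pyGet? vPos 0 = some (vPos[0]'hlen0) := by
    rw [PySem.List.pyGet?_of_nonneg vPos le_rfl]
    exact List.getElem?_eq_getElem (by omega)
  have hheadI : vPos.headI = vPos[0]'hlen0 := by
    cases vPos with
    | nil => simp at hlen0
    | cons a t => rfl
  rw [hheadI] at hh0 hhle
  have hq : PySem.List.pyGet? vPos (nNum - 1) =
      some (vPos[(nNum - 1).toNat]'(by omega)) := by
    rw [PySem.List.pyGet?_of_nonneg vPos (by omega)]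
    exact List.getElem?_eq_getElem (by omega)
  have hcopy := pvLoop1_copy vNames vPos vND nNum 0 (vPos[0]'hlen0) hn hp0 hhle
    [] 0 le_rfl hh0
  have hemit := pvLoop1_emit vNames vPos vND nNum hpos hnd 0 le_rfl hn
    (vPos[0]'hlen0) (vPos[(nNum - 1).toNat]'(by omega)) hp0 hq
    ([] ++ pvCopyIdx vNames 0 (vPos[0]'hlen0))
  rw [hcopy, hemit]
  rw [if_pos hn]
  simp only [hp0, hq]
  rw [pvLoop2_eq_copy]
  simp

-- ===== VERDICT (by name: the statements are the Claim_ definitions above) =====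
theorem name_disaggregation_spec : Claim_unchanged_name_disaggregation := by
  intro vNames nNum vPos vND nIndex _hdom hpre hnd_
  obtain ⟨hpos, hnd, hhead, _hzero⟩ := hpre
  by_cases hn : 0 < nNum
  · obtain ⟨hh0, hhle, _⟩ := hhead hn
    exact pv_eq_pos vNames nNum vPos vND nIndex hn hpos hnd hh0 hhle
  · have hidx : nIndex ≤ 0 := by
      by_contra hc
      exact hnd_ ⟨by omega, by omega⟩
    unfold name_disaggregation name_disaggregation_alt
    rw [if_neg hn]
    conv_lhs => rw [pvLoop1, dif_neg (show ¬ (0 : Int) < nNum from hn)]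
    rw [pvLoop2_eq_copy]
    have h1 : pvCopyIdx vNames 1 nIndex = ([] : List String) := by
      rw [pvCopyIdx, dif_neg (show ¬ (1 : Int) < nIndex by omega)]
    have h0 : pvCopyIdx vNames 0 nIndex = ([] : List String) := by
      rw [pvCopyIdx, dif_neg (show ¬ (0 : Int) < nIndex by omega)]
    simp [h1, h0]

theorem name_disaggregation_changed : Claim_changed_name_disaggregation := by
  unfold Claim_changed_name_disaggregation
  refine ⟨by decide, by decide, by decide, ?_, ?_, by decide⟩
  · simp [pvDiffWitness_name_disaggregation, pvDiffWitnessOut_name_disaggregation,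
      name_disaggregation, pvLoop1, pvLoop2, PySem.List.pyGet?, PySem.List.pyIdx?]
  · simp [pvDiffWitness_name_disaggregation, pvDiffWitnessOut_name_disaggregation,
      name_disaggregation_alt, pvCopyIdx, PySem.List.pyGet?, PySem.List.pyIdx?]

theorem name_disaggregation_tight : Claim_exact_name_disaggregation := by
  intro vNames nNum vPos vND nIndex _hdom hpre hd
  obtain ⟨hle, hge⟩ := hd
  obtain ⟨_, _, _, hzero⟩ := hpre
  have hlenOk : nIndex ≤ (vNames.length : Int) := by
    rcases hzero hle with h | h
    · omega
    · exact h
  have hlen0 : 0 < vNames.length := by omega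
  have hv0 : PySem.List.pyGet? vNames 0 = some (vNames[0]'hlen0) := by
    rw [PySem.List.pyGet?_of_nonneg vNames le_rfl]
    exact List.getElem?_eq_getElem (by omega)
  unfold name_disaggregation name_disaggregation_alt
  rw [if_neg (show ¬ 0 < nNum by omega)]
  conv_lhs => rw [pvLoop1, dif_neg (show ¬ (0 : Int) < nNum by omega)]
  rw [pvLoop2_eq_copy]
  have hsplit : pvCopyIdx vNames 0 nIndex = vNames[0]'hlen0 :: pvCopyIdx vNames 1 nIndex := by
    rw [pvCopyIdx, dif_pos (show (0 : Int) < nIndex by omega), hv0]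
    norm_num
  rw [hsplit]
  simp only [List.nil_append, zero_add]
  intro hcontra
  have := congrArg List.length hcontra
  simp at this
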